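-- pv_equiv track=rewrite | github.com/px-pride/axi-assistant | axi/discord_wire.py | _ids_from_path
-- ===== SOURCE A (Python) =====
-- def _ids_from_path(path: str) -> tuple[str | None, str | None, str | None]:
--     parts = [part for part in path.strip("/").split("/") if part]
--     guild_id = None
--     channel_id = None
--     message_id = None
--     for index, part in enumerate(parts):
--         if part == "guilds" and index + 1 < len(parts):
--             guild_id = parts[index + 1]
--         elif part == "channels" and index + 1 < len(parts):
--             channel_id = parts[index + 1]
--         elif part == "messages" and index + 1 < len(parts):
--             message_id = parts[index + 1]
--     return guild_id, channel_id, message_id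
-- ===== SOURCE B (Python) =====
-- def _ids_from_path(path: str) -> tuple[str | None, str | None, str | None]:
--     parts = [part for part in path.strip("/").split("/") if part]
--
--     def value_after_last(marker):
--         # scan right-to-left; first hit (that has a successor) is A's last-wins value
--         for i in range(len(parts) - 2, -1, -1):
--             if parts[i] == marker:
--                 return parts[i + 1]
--         return None
--
--     return (value_after_last("guilds"),
--             value_after_last("channels"),
--             value_after_last("messages"))
-- ===== Notes on version B (the rewrite author's own statement) =====
-- stated objective: alternative
-- what changed: Replaces the single forward last-wins scan that mutates three accumulators with three independent early-exit right-to-left searches: for each marker, scan parts from the end and return the successor of the first marker found.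
import Mathlib
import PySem

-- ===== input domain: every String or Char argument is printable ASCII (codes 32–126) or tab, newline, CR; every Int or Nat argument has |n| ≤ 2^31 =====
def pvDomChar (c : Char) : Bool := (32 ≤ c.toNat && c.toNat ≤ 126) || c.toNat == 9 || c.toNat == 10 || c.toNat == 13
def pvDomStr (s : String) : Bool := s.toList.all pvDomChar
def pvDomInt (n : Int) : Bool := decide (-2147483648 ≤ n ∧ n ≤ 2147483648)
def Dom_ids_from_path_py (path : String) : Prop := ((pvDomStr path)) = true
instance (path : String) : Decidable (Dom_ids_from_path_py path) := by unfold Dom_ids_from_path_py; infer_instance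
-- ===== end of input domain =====

-- B replaces A's single forward last-wins scan by three independent early-exit right-to-left
-- searches (successor of the first marker found from the end); alternative decomposition.

-- ===== PORT A =====
def ids_from_path_py (path : String) : Option String × Option String × Option String :=
  let parts := ((PySem.Str.split? (PySem.Str.stripChars path "/") "/").getD []).filter
    (fun part => part ≠ "")
  (PySem.List.enumerate parts 0).foldl
    (fun (st : Option String × Option String × Option String) ip =>
      if ip.2 = "guilds" ∧ ip.1 + 1 < (parts.length : Int) then
        (some (PySem.List.pyGetD parts (ip.1 + 1) ""), st.2.1, st.2.2)
      else if ip.2 = "channels" ∧ ip.1 + 1 < (parts.length : Int) then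
        (st.1, some (PySem.List.pyGetD parts (ip.1 + 1) ""), st.2.2)
      else if ip.2 = "messages" ∧ ip.1 + 1 < (parts.length : Int) then
        (st.1, st.2.1, some (PySem.List.pyGetD parts (ip.1 + 1) ""))
      else st)
    (none, none, none)

-- ===== PORT B =====
-- Source B's 'for i in range(len(parts) - 2, -1, -1): …' with an early return: structural descent
-- over the index; all indices accessed are in range, so List.getD is exact here.
def pvValueAfterLast (parts : List String) (marker : String) : Nat → Option String
  | 0 => none
  | n + 1 =>
    if parts.getD n "" = marker then some (parts.getD (n + 1) "")
    else pvValueAfterLast parts marker n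

def ids_from_path_py_alt (path : String) : Option String × Option String × Option String :=
  let parts := ((PySem.Str.split? (PySem.Str.stripChars path "/") "/").getD []).filter
    (fun part => part ≠ "")
  (pvValueAfterLast parts "guilds" (parts.length - 1),
   pvValueAfterLast parts "channels" (parts.length - 1),
   pvValueAfterLast parts "messages" (parts.length - 1))

-- ===== PRECONDITION & SPEC =====
def Spec_ids_from_path_py (path : String) (out : Option String × Option String × Option String) : Prop := out = ids_from_path_py_alt path
instance (path : String) (out : Option String × Option String × Option String) : Decidable (Spec_ids_from_path_py path out) := by unfold Spec_ids_from_path_py; infer_instance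

-- ===== CLAIM (what is proved, stated in full; the proofs are below) =====
def Claim_equal_ids_from_path_py : Prop := ∀ (path : String), Dom_ids_from_path_py path → Spec_ids_from_path_py path (ids_from_path_py path)

-- ===== LEMMAS AND PROOFS =====

-- the step A's guarded enumerate-fold induces on successor pairs
def pvStepZ (st : Option String × Option String × Option String) (ab : String × String) :
    Option String × Option String × Option String :=
  if ab.1 = "guilds" then (some ab.2, st.2.1, st.2.2)
  else if ab.1 = "channels" then (st.1, some ab.2, st.2.2)
  else if ab.1 = "messages" then (st.1, st.2.1, some ab.2)
  else st

-- first successor of marker in ps, else dflt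
def pvPick (ps : List (String × String)) (m : String) (dflt : Option String) : Option String :=
  match ps.find? (fun ab => ab.1 == m) with
  | some ab => some ab.2
  | none => dflt

-- A's guarded enumerate-fold over a suffix equals the plain fold over the zip's suffix
theorem pvA_suffix (full : List String) (k : Nat) (hk : k ≤ full.length)
    (acc : Option String × Option String × Option String) :
    (PySem.List.enumerate (full.drop k) (k : Int)).foldl
      (fun st ip =>
        if ip.2 = "guilds" ∧ ip.1 + 1 < (full.length : Int) then
          (some (PySem.List.pyGetD full (ip.1 + 1) ""), st.2.1, st.2.2)
        else if ip.2 = "channels" ∧ ip.1 + 1 < (full.length : Int) then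
          (st.1, some (PySem.List.pyGetD full (ip.1 + 1) ""), st.2.2)
        else if ip.2 = "messages" ∧ ip.1 + 1 < (full.length : Int) then
          (st.1, st.2.1, some (PySem.List.pyGetD full (ip.1 + 1) ""))
        else st) acc
    = ((full.zip full.tail).drop k).foldl pvStepZ acc := by
  rcases Nat.lt_or_ge k full.length with h | h
  · rw [List.drop_eq_getElem_cons h, PySem.List.enumerate_cons, List.foldl_cons]
    have hget : PySem.List.pyGetD full ((k : Int) + 1) "" = full.getD (k + 1) "" := by
      have := PySem.List.pyGetD_natCast full (k + 1) ""
      push_cast at this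
      exact this
    by_cases h2 : k + 1 < full.length
    · have hz : (full.zip full.tail).drop k
          = (full[k], full[k+1]) :: (full.zip full.tail).drop (k + 1) := by
        have hlt : k < (full.zip full.tail).length := by
          simp [List.length_zip, List.length_tail]; omega
        rw [List.drop_eq_getElem_cons hlt]
        congr 1
        rw [List.getElem_zip]
        congr 1
        exact List.getElem_tail _
      rw [hz, List.foldl_cons]
      have hcond : ((k : Int) + 1 < (full.length : Int)) := by exact_mod_cast h2
      have hstep :
          (if full[k] = "guilds" ∧ (k : Int) + 1 < (full.length : Int) then
             (some (PySem.List.pyGetD full ((k : Int) + 1) ""), acc.2.1, acc.2.2)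
           else if full[k] = "channels" ∧ (k : Int) + 1 < (full.length : Int) then
             (acc.1, some (PySem.List.pyGetD full ((k : Int) + 1) ""), acc.2.2)
           else if full[k] = "messages" ∧ (k : Int) + 1 < (full.length : Int) then
             (acc.1, acc.2.1, some (PySem.List.pyGetD full ((k : Int) + 1) ""))
           else acc)
          = pvStepZ acc (full[k], full[k+1]) := by
        have hx : full[k+1]? = some full[k+1] := List.getElem?_eq_getElem h2
        simp [pvStepZ, hcond, hget, hx]
      simp only [hstep]
      have := pvA_suffix full (k + 1) (by omega) (pvStepZ acc (full[k], full[k+1]))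
      push_cast at this ⊢
      exact this
    · have hcond : ¬ ((k : Int) + 1 < (full.length : Int)) := by exact_mod_cast h2
      have hz : (full.zip full.tail).drop k = [] := by
        apply List.drop_eq_nil_of_le
        simp [List.length_zip, List.length_tail]; omega
      have hd : full.drop (k + 1) = [] := List.drop_eq_nil_of_le (by omega)
      simp [hcond, hz, hd]
  · have h1 : full.drop k = [] := List.drop_eq_nil_of_le h
    have h2 : (full.zip full.tail).drop k = [] := by
      apply List.drop_eq_nil_of_le
      simp [List.length_zip, List.length_tail]; omega
    simp [h1, h2]
termination_by full.length - k

-- pvPick distributes over append (first match wins, so the right block is the fallback)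
theorem pvPick_append (l₁ l₂ : List (String × String)) (m : String) (d : Option String) :
    pvPick (l₁ ++ l₂) m d = pvPick l₁ m (pvPick l₂ m d) := by
  unfold pvPick
  rw [List.find?_append]
  cases l₁.find? (fun ab => ab.1 == m) <;> simp

-- the forward fold's components are pvPick on the reversed pair list
theorem pv_fold_pick (ps : List (String × String))
    (init : Option String × Option String × Option String) :
    ps.foldl pvStepZ init =
      (pvPick ps.reverse "guilds" init.1,
       pvPick ps.reverse "channels" init.2.1,
       pvPick ps.reverse "messages" init.2.2) := by
  induction ps generalizing init with
  | nil => simp [pvPick]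
  | cons ab ps ih =>
    rw [List.foldl_cons, ih, List.reverse_cons]
    have hone : ∀ m d, pvPick [ab] m d = if ab.1 = m then some ab.2 else d := by
      intro m d
      unfold pvPick
      by_cases h : ab.1 = m
      · simp [List.find?, h]
      · have hb : (ab.1 == m) = false := by simp [h]
        simp [List.find?, hb, h]
    rw [pvPick_append, pvPick_append, pvPick_append, hone, hone, hone]
    rcases ab with ⟨a, b⟩
    unfold pvStepZ
    by_cases h1 : a = "guilds"
    · simp [h1]
    · by_cases h2 : a = "channels"
      · simp [h2]
      · by_cases h3 : a = "messages" <;> simp [h1, h2, h3]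

-- B's backward search equals pvPick on the reversed prefix of the zip
theorem pv_go_pick (parts : List String) (marker : String) (k : Nat)
    (hk : k ≤ (parts.zip parts.tail).length) :
    pvValueAfterLast parts marker k
      = pvPick ((parts.zip parts.tail).take k).reverse marker none := by
  induction k with
  | zero => simp [pvValueAfterLast, pvPick]
  | succ n ih =>
    have hn : n < (parts.zip parts.tail).length := by omega
    have hn' : n < min parts.length (parts.length - 1) := by
      simpa [List.length_zip, List.length_tail] using hn
    have hn1 : n + 1 < parts.length := by omega
    have htake : (parts.zip parts.tail).take (n + 1)
        = (parts.zip parts.tail).take n ++ [(parts.zip parts.tail)[n]] := by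
      rw [List.take_add_one, List.getElem?_eq_getElem hn]; rfl
    have hz : (parts.zip parts.tail)[n] = (parts[n], parts[n+1]) := by
      rw [List.getElem_zip]
      congr 1
      exact List.getElem_tail _
    rw [htake, List.reverse_append, hz]
    show pvValueAfterLast parts marker (n + 1) = _
    unfold pvValueAfterLast
    rw [List.getD_eq_getElem parts "" (by omega), List.getD_eq_getElem parts "" hn1]
    by_cases h : parts[n] = marker
    · simp [pvPick, h]
    · simp only [h, if_false]
      rw [ih (by omega)]
      simp [pvPick, h]

-- ===== VERDICT (by name: the statement is the Claim_ definition above) =====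
theorem ids_from_path_py_spec : Claim_equal_ids_from_path_py := by
  intro path _
  unfold Spec_ids_from_path_py ids_from_path_py ids_from_path_py_alt
  simp only []
  generalize (((PySem.Str.split? (PySem.Str.stripChars path "/") "/").getD []).filter
    (fun part => part ≠ "")) = parts
  have hA := pvA_suffix parts 0 (Nat.zero_le _) (none, none, none)
  simp only [List.drop_zero, Nat.cast_zero] at hA
  rw [hA, pv_fold_pick]
  have hk : parts.length - 1 = (parts.zip parts.tail).length := by
    simp [List.length_zip, List.length_tail]
  have htake : ((parts.zip parts.tail).take (parts.length - 1)) = parts.zip parts.tail := by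
    rw [hk]; exact List.take_length
  have hgo : ∀ m, pvValueAfterLast parts m (parts.length - 1)
      = pvPick (parts.zip parts.tail).reverse m none := by
    intro m
    rw [pv_go_pick parts m _ (le_of_eq hk), htake]
  simp only [hgo]
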